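-- pv_equiv track=rewrite | github.com/UTokyo-HayashiLab/RED | eval.py | deriv_breakpoints
-- ===== SOURCE A (Python) =====
-- def deriv_breakpoints(labels):
--     """1-based indices where label changes (ignore INS=-1 by forward-fill)."""
--     lab = []
--     cur = None
--     for v in labels:
--         if v == -1:
--             lab.append(cur if cur is not None else 0)  # forward-fill for stability
--         else:
--             lab.append(v); cur = v
--     bps = []
--     for i in range(1, len(lab)):
--         if lab[i] != lab[i-1]:
--             bps.append(i+1)  # 1-based start of new segment
--     return bps
-- ===== SOURCE B (Python) =====
-- def deriv_breakpoints(labels):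
--     """1-based indices where label changes (ignore INS=-1 by forward-fill)."""
--     bps = []
--     cur = None
--     prev = None
--     for i, v in enumerate(labels):
--         f = v if v != -1 else (cur if cur is not None else 0)
--         if v != -1:
--             cur = v
--         if i > 0 and f != prev:
--             bps.append(i + 1)
--         prev = f
--     return bps
-- ===== Notes on version B (the rewrite author's own statement) =====
-- stated objective: simpler
-- what changed: Single fused pass keeping only scalar state (last non -1 label and the previous position's filled value) instead of materializing the forward-filled list and then rescanning it by index.
import Mathlib
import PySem

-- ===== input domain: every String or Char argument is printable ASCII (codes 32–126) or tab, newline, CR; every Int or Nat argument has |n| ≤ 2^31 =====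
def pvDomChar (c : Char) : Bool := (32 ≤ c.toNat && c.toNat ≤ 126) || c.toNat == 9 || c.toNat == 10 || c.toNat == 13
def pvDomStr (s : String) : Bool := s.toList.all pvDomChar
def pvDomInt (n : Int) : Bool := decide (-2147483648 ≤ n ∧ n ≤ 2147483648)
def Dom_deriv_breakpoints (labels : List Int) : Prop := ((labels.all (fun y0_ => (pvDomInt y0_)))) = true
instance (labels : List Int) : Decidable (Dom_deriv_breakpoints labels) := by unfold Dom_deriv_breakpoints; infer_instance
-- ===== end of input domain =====

-- B fuses A's two passes into one loop over (index, value) keeping only scalar state; same return value, no speed claim.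

-- ===== PORT A =====
-- A, first loop body: forward-fill one element into lab (state = (lab, cur)).
def pvFillStep (st : List Int × Option Int) (v : Int) : List Int × Option Int :=
  if v = -1 then (st.1 ++ [st.2.getD 0], st.2) else (st.1 ++ [v], some v)

-- A, second loop: for i in range(1, len(lab)): if lab[i] != lab[i-1]: bps.append(i+1)
def pvScanA (lab : List Int) : List Int :=
  (PySem.List.pyRange 1 (lab.length : Int) 1).foldl
    (fun bps i =>
      if PySem.List.pyGetD lab i 0 ≠ PySem.List.pyGetD lab (i - 1) 0 then bps ++ [i + 1] else bps)
    []

def deriv_breakpoints (labels : List Int) : List Int :=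
  pvScanA (labels.foldl pvFillStep ([], none)).1

-- ===== PORT B =====
-- B, loop body over (i, v): f = filled value, cur' = last non -1 label, append i+1 on change.
def pvStepB (st : List Int × Option Int × Option Int) (p : Int × Int) :
    List Int × Option Int × Option Int :=
  let f : Int := if p.2 ≠ -1 then p.2 else st.2.1.getD 0
  let cur' : Option Int := if p.2 ≠ -1 then some p.2 else st.2.1
  let bps' : List Int := if 0 < p.1 ∧ some f ≠ st.2.2 then st.1 ++ [p.1 + 1] else st.1
  (bps', cur', some f)

def deriv_breakpoints_alt (labels : List Int) : List Int :=
  ((PySem.List.enumerate labels 0).foldl pvStepB ([], none, none)).1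

-- ===== PRECONDITION & SPEC =====
def Spec_deriv_breakpoints (labels : List Int) (out : List Int) : Prop := out = deriv_breakpoints_alt labels
instance (labels : List Int) (out : List Int) : Decidable (Spec_deriv_breakpoints labels out) := by unfold Spec_deriv_breakpoints; infer_instance

-- ===== CLAIM (what is proved, stated in full; the proofs are below) =====
def Claim_equal_deriv_breakpoints : Prop := ∀ (labels : List Int), Dom_deriv_breakpoints labels → Spec_deriv_breakpoints labels (deriv_breakpoints labels)

-- ===== LEMMAS AND PROOFS =====

-- the forward-filled list A's first loop builds
def pvFill (cur : Option Int) : List Int → List Int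
  | [] => []
  | v :: r => if v = -1 then cur.getD 0 :: pvFill cur r else v :: pvFill (some v) r

-- the running `cur` after A's first loop
def pvFcur (cur : Option Int) : List Int → Option Int
  | [] => cur
  | v :: r => if v = -1 then pvFcur cur r else pvFcur (some v) r

-- breakpoints of a filled tail whose first element sits at 0-based position i, previous filled value prev
def pvBp (i prev : Int) : List Int → List Int
  | [] => []
  | x :: r => (if x ≠ prev then [i + 1] else []) ++ pvBp (i + 1) x r

def pvBpOf : List Int → List Int
  | [] => []
  | x :: r => pvBp 1 x r

theorem pvFill_fold (xs : List Int) : ∀ (acc : List Int) (cur : Option Int),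
    xs.foldl pvFillStep (acc, cur) = (acc ++ pvFill cur xs, pvFcur cur xs) := by
  induction xs with
  | nil => intro acc cur; simp [pvFill, pvFcur]
  | cons v r ih =>
    intro acc cur
    by_cases h : v = -1 <;>
      simp [pvFill, pvFcur, pvFillStep, h, List.foldl_cons, ih]

theorem pvGetD_append_left (ys t : List Int) (i : Int) (h0 : 0 ≤ i) (h : i.toNat < ys.length) :
    PySem.List.pyGetD (ys ++ t) i 0 = PySem.List.pyGetD ys i 0 := by
  rw [PySem.List.pyGetD_of_nonneg _ _ h0, PySem.List.pyGetD_of_nonneg _ _ h0]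
  simp [List.getD, List.getElem?_append_left h]

theorem pvGetD_last_cons (y0 : Int) (ys' : List Int) :
    PySem.List.pyGetD (y0 :: ys') ((ys'.length : Int)) 0 = (y0 :: ys').getLastD 0 := by
  rw [PySem.List.pyGetD_of_nonneg _ _ (Int.natCast_nonneg _), Int.toNat_natCast,
      List.getLastD_eq_getLast?, List.getLast?_eq_getElem?]
  simp [List.getD]

theorem pvScanA_append (ys : List Int) (z : Int) :
    pvScanA (ys ++ [z]) = pvScanA ys ++
      (if ys = [] then []
       else if z ≠ ys.getLastD 0 then [(ys.length : Int) + 1] else []) := by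
  by_cases hys : ys = []
  · subst hys
    simp [pvScanA, PySem.List.pyRange_one_eq_nil (by norm_num : (1:Int) ≤ 1)]
  · have hn : 1 ≤ (ys.length : Int) := by
      have := List.length_pos_iff.mpr hys; omega
    have hlen : ((ys ++ [z]).length : Int) = (ys.length : Int) + 1 := by simp
    unfold pvScanA
    rw [hlen, PySem.List.pyRange_one_succ_right hn, List.foldl_append]
    have hpre :
        (PySem.List.pyRange 1 (ys.length : Int) 1).foldl
          (fun bps i =>
            if PySem.List.pyGetD (ys ++ [z]) i 0 ≠ PySem.List.pyGetD (ys ++ [z]) (i - 1) 0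
            then bps ++ [i + 1] else bps) [] =
        (PySem.List.pyRange 1 (ys.length : Int) 1).foldl
          (fun bps i =>
            if PySem.List.pyGetD ys i 0 ≠ PySem.List.pyGetD ys (i - 1) 0
            then bps ++ [i + 1] else bps) [] := by
      apply PySem.List.foldl_congr_mem
      intro acc i hi
      rw [PySem.List.mem_pyRange_one] at hi
      rw [pvGetD_append_left ys [z] i (by omega) (by omega),
          pvGetD_append_left ys [z] (i - 1) (by omega) (by omega)]
    rw [hpre]
    have hz : PySem.List.pyGetD (ys ++ [z]) (ys.length : Int) 0 = z := by
      rw [PySem.List.pyGetD_of_nonneg _ _ (by omega)]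
      simp [List.getD]
    have hlast : PySem.List.pyGetD (ys ++ [z]) ((ys.length : Int) - 1) 0 = ys.getLastD 0 := by
      rcases List.exists_cons_of_ne_nil hys with ⟨y0, ys', rfl⟩
      have hidx : (((y0 :: ys').length : Int)) - 1 = (ys'.length : Int) := by simp
      rw [hidx, pvGetD_append_left _ [z] _ (Int.natCast_nonneg _) (by simp)]
      exact pvGetD_last_cons y0 ys'
    simp only [List.foldl_cons, List.foldl_nil, hz, hlast, if_neg hys]
    split_ifs with hne
    · rfl
    · simp

theorem pvBp_append (r : List Int) : ∀ (z i prev : Int),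
    pvBp i prev (r ++ [z]) =
      pvBp i prev r ++ (if z ≠ r.getLastD prev then [i + (r.length : Int) + 1] else []) := by
  induction r with
  | nil => intro z i prev; simp [pvBp]
  | cons x r ih =>
    intro z i prev
    have harith : i + 1 + (r.length : Int) + 1 = i + ((r.length : Int) + 1) + 1 := by ring
    simp only [List.cons_append, pvBp, ih, List.getLastD_cons, List.length_cons,
      List.append_assoc, harith]
    push_cast
    ring_nf

theorem pvBpOf_append (ys : List Int) (z : Int) :
    pvBpOf (ys ++ [z]) = pvBpOf ys ++
      (if ys = [] then []
       else if z ≠ ys.getLastD 0 then [(ys.length : Int) + 1] else []) := by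
  cases ys with
  | nil => simp [pvBpOf, pvBp]
  | cons y0 ys' =>
    have harith : (1 : Int) + (ys'.length : Int) + 1 = ((ys'.length : Int) + 1) + 1 := by ring
    simp only [List.cons_append, pvBpOf, pvBp_append, List.getLastD_cons, List.length_cons,
      reduceCtorEq, if_false, harith]
    push_cast
    ring_nf

theorem pvScanA_eq_bpOf (lab : List Int) : pvScanA lab = pvBpOf lab := by
  induction lab using List.reverseRecOn with
  | nil => simp [pvScanA, pvBpOf, PySem.List.pyRange_one_eq_nil (by norm_num : (0:Int) ≤ 1)]
  | append_singleton ys z ih => rw [pvScanA_append, pvBpOf_append, ih]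

theorem pvAlt_go (xs : List Int) : ∀ (k : Int) (cur : Option Int) (prev : Int) (bps : List Int),
    1 ≤ k →
    (((PySem.List.enumerate xs k).foldl pvStepB (bps, cur, some prev)).1)
      = bps ++ pvBp k prev (pvFill cur xs) := by
  induction xs with
  | nil => intro k cur prev bps _; simp [PySem.List.enumerate_nil, pvFill, pvBp]
  | cons v r ih =>
    intro k cur prev bps hk
    rw [PySem.List.enumerate_cons, List.foldl_cons]
    by_cases h : v = -1
    · subst h
      have hstep : pvStepB (bps, cur, some prev) (k, -1) =
          ((if cur.getD 0 ≠ prev then bps ++ [k + 1] else bps), cur, some (cur.getD 0)) := by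
        simp [pvStepB, show (0:Int) < k by omega]
      rw [hstep, ih (k + 1) cur (cur.getD 0) _ (by omega)]
      by_cases hne : cur.getD 0 ≠ prev <;>
        simp [pvFill, pvBp, hne, List.append_assoc]
    · have hstep : pvStepB (bps, cur, some prev) (k, v) =
          ((if v ≠ prev then bps ++ [k + 1] else bps), some v, some v) := by
        simp [pvStepB, h, show (0:Int) < k by omega]
      rw [hstep, ih (k + 1) (some v) v _ (by omega)]
      by_cases hne : v ≠ prev <;>
        simp [pvFill, pvBp, h, hne, List.append_assoc]

theorem pvAlt_eq_bpOf (labels : List Int) :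
    deriv_breakpoints_alt labels = pvBpOf (pvFill none labels) := by
  cases labels with
  | nil => simp [deriv_breakpoints_alt, pvFill, pvBpOf, PySem.List.enumerate_nil]
  | cons v r =>
    unfold deriv_breakpoints_alt
    rw [PySem.List.enumerate_cons, List.foldl_cons]
    by_cases h : v = -1
    · subst h
      have hstep : pvStepB ([], none, none) ((0 : Int), (-1 : Int)) =
          ([], none, some 0) := by simp [pvStepB]
      rw [hstep, show (0:Int) + 1 = 1 by norm_num, pvAlt_go r 1 none 0 [] (by norm_num)]
      simp [pvFill, pvBpOf]
    · have hstep : pvStepB ([], none, none) ((0 : Int), v) =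
          ([], some v, some v) := by simp [pvStepB, h]
      rw [hstep, show (0:Int) + 1 = 1 by norm_num, pvAlt_go r 1 (some v) v [] (by norm_num)]
      simp [pvFill, h, pvBpOf]

-- ===== VERDICT (by name: the statement is the Claim_ definition above) =====
theorem deriv_breakpoints_spec : Claim_equal_deriv_breakpoints := by
  intro labels _
  show deriv_breakpoints labels = deriv_breakpoints_alt labels
  unfold deriv_breakpoints
  rw [pvFill_fold labels [] none]
  rw [pvAlt_eq_bpOf]
  simpa using pvScanA_eq_bpOf (pvFill none labels)
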